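-- pv_equiv track=rewrite | github.com/RaghavgitGrover/DASS_Project | code/R2_New/R2/timetable_generator.py | find_course_conflicts
-- ===== SOURCE A (Python) =====
-- from typing import Dict, List, Set, Tuple
--
-- def find_course_conflicts(course_students: Dict[str, Set[str]],
--                          course_timeslots: Dict[str, List[Tuple[str, int]]]) -> List[Tuple[str, str]]:
--     """Find pairs of courses that have student conflicts."""
--     conflicts = []
--
--     courses = list(course_students.keys())
--     for i in range(len(courses)):
--         for j in range(i + 1, len(courses)):
--             course1, course2 = courses[i], courses[j]
--             students1 = course_students[course1]
--             students2 = course_students[course2]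
--
--             # If there's any overlap in students
--             if students1 & students2:
--                 conflicts.append((course1, course2))
--
--     return conflicts
-- ===== SOURCE B (Python) =====
-- from typing import Dict, List, Set, Tuple
--
-- def find_course_conflicts(course_students: Dict[str, Set[str]],
--                           course_timeslots: Dict[str, List[Tuple[str, int]]]) -> List[Tuple[str, str]]:
--     """Find pairs of courses that have student conflicts.
--
--     Inverted index: group course indices by student, mark every conflicting
--     index pair once, then emit the marked pairs in the original pair order —
--     no per-pair set intersection.
--     """
--     courses = list(course_students.keys())
--
--     # student -> ascending list of indices of the courses that contain them
--     student_courses = {}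
--     for i, students in enumerate(course_students.values()):
--         for s in students:
--             student_courses.setdefault(s, []).append(i)
--
--     # mark every pair of courses sharing a student
--     conflicting = set()
--     for idxs in student_courses.values():
--         for a in range(len(idxs)):
--             for b in range(a + 1, len(idxs)):
--                 conflicting.add((idxs[a], idxs[b]))
--
--     return [(courses[i], courses[j])
--             for i in range(len(courses))
--             for j in range(i + 1, len(courses))
--             if (i, j) in conflicting]
-- ===== Notes on version B (the rewrite author's own statement) =====
-- stated objective: alternative
-- what changed: Replaces the per-pair set intersection with an inverted index student -> course indices: conflicting index pairs are marked once per shared student and then emitted by a set lookup per pair; much cheaper when students are in few courses, comparable on dense inputs.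
import Mathlib
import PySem

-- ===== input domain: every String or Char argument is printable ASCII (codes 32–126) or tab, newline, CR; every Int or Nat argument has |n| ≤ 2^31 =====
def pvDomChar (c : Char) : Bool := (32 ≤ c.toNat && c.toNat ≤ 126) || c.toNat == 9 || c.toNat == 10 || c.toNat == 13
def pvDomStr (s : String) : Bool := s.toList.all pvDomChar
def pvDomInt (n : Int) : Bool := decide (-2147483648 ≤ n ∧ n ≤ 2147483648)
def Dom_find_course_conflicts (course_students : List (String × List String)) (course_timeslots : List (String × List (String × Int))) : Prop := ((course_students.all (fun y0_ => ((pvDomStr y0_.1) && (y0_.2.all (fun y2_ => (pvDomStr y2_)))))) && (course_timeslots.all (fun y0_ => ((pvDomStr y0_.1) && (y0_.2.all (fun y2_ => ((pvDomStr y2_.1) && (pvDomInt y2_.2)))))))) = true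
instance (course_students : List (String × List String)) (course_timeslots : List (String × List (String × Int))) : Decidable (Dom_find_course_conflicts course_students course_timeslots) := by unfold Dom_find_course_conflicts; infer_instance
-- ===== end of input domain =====

-- B replaces A's per-pair set intersection by an inverted index student -> course indices
-- that marks each conflicting pair once (objective: alternative algorithm, same result).

-- ===== PORT A =====
-- The dict argument is modelled as PySem.Dict.ofList of the association list; the set values
-- as PySem.Set.ofList of their element lists.
def find_course_conflicts (course_students : List (String × List String)) (_course_timeslots : List (String × List (String × Int))) : List (String × String) :=
  let d := PySem.Dict.ofList course_students
  let courses := PySem.Dict.keys d                                -- courses = list(course_students.keys())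
  (PySem.List.pyRange 0 (courses.length : Int) 1).foldl (fun conflicts i =>       -- for i in range(len(courses))
    (PySem.List.pyRange (i + 1) (courses.length : Int) 1).foldl (fun conflicts j =>   -- for j in range(i+1, len(courses))
      let course1 := PySem.List.pyGetD courses i ""
      let course2 := PySem.List.pyGetD courses j ""
      let students1 : PySem.Set String := PySem.Set.ofList (PySem.Dict.getD d course1 [])
      let students2 : PySem.Set String := PySem.Set.ofList (PySem.Dict.getD d course2 [])
      if PySem.Set.inter students1 students2 ≠ [] then            -- if students1 & students2:
        conflicts ++ [(course1, course2)]
      else conflicts)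
      conflicts) []

-- ===== PORT B =====
def find_course_conflicts_alt (course_students : List (String × List String)) (_course_timeslots : List (String × List (String × Int))) : List (String × String) :=
  let d := PySem.Dict.ofList course_students
  let courses := PySem.Dict.keys d                                -- courses = list(course_students.keys())
  -- for i, students in enumerate(course_students.values()): for s in students: sc.setdefault(s, []).append(i)  (= modify)
  let student_courses := (PySem.List.enumerate (PySem.Dict.values d) 0).foldl
    (fun sc p => (PySem.Set.ofList p.2).foldl (fun sc s => sc.modify s [] (· ++ [p.1])) sc)
    PySem.Dict.empty
  -- for idxs in student_courses.values(): for a …: for b …: conflicting.add((idxs[a], idxs[b]))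
  let conflicting := (PySem.Dict.values student_courses).foldl
    (fun conf idxs =>
      (PySem.List.pyRange 0 (idxs.length : Int) 1).foldl (fun conf a =>
        (PySem.List.pyRange (a + 1) (idxs.length : Int) 1).foldl (fun conf b =>
          PySem.Set.add conf (PySem.List.pyGetD idxs a 0, PySem.List.pyGetD idxs b 0)) conf) conf)
    PySem.Set.empty
  -- [(courses[i], courses[j]) for i … for j … if (i, j) in conflicting]
  (PySem.List.pyRange 0 (courses.length : Int) 1).foldl (fun out i =>
    (PySem.List.pyRange (i + 1) (courses.length : Int) 1).foldl (fun out j =>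
      if PySem.Set.contains conflicting (i, j) then
        out ++ [(PySem.List.pyGetD courses i "", PySem.List.pyGetD courses j "")]
      else out) out) []

-- ===== PRECONDITION & SPEC =====
def Spec_find_course_conflicts (course_students : List (String × List String)) (course_timeslots : List (String × List (String × Int))) (out : List (String × String)) : Prop := out = find_course_conflicts_alt course_students course_timeslots
instance (course_students : List (String × List String)) (course_timeslots : List (String × List (String × Int))) (out : List (String × String)) : Decidable (Spec_find_course_conflicts course_students course_timeslots out) := by unfold Spec_find_course_conflicts; infer_instance

-- ===== CLAIM (what is proved, stated in full; the proofs are below) =====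
def Claim_equal_find_course_conflicts : Prop := ∀ (course_students : List (String × List String)) (course_timeslots : List (String × List (String × Int))), Dom_find_course_conflicts course_students course_timeslots → Spec_find_course_conflicts course_students course_timeslots (find_course_conflicts course_students course_timeslots)

-- ===== LEMMAS AND PROOFS =====

-- B's inverted index (the dict student -> course indices), as a function of the value list.
def pvSC (vals : List (List String)) : PySem.Dict String (List Int) :=
  (PySem.List.enumerate vals 0).foldl
    (fun sc p => (PySem.Set.ofList p.2).foldl (fun sc s => sc.modify s [] (· ++ [p.1])) sc)
    PySem.Dict.empty

-- B's set of conflicting index pairs.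
def pvConf (vals : List (List String)) : PySem.Set (Int × Int) :=
  (PySem.Dict.values (pvSC vals)).foldl
    (fun conf idxs =>
      (PySem.List.pyRange 0 (idxs.length : Int) 1).foldl (fun conf a =>
        (PySem.List.pyRange (a + 1) (idxs.length : Int) 1).foldl (fun conf b =>
          PySem.Set.add conf (PySem.List.pyGetD idxs a 0, PySem.List.pyGetD idxs b 0)) conf) conf)
    PySem.Set.empty

-- The flattened (student, course index) pair list the index-building loop processes.
def pvPairs (vals : List (List String)) : List (String × Int) :=
  (PySem.List.enumerate vals 0).flatMap (fun p => (PySem.Set.ofList p.2).map (fun s => (s, p.1)))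

-- The ascending list of indices of the courses containing student s.
def pvG (vals : List (List String)) (s : String) : List Int :=
  ((PySem.List.enumerate vals 0).filter (fun p => decide (s ∈ p.2))).map (fun p => p.1)

lemma pvFilter_beq_nodup {α : Type} [BEq α] [LawfulBEq α] (s : α) :
    ∀ (l : List α), l.Nodup → l.filter (· == s) = if s ∈ l then [s] else [] := by
  intro l h
  rw [List.filter_beq]
  by_cases hm : s ∈ l
  · simp [hm, List.count_eq_one_of_mem h hm]
  · simp [hm, List.count_eq_zero_of_not_mem hm]

lemma pvSC_eq_flat (vals : List (List String)) :
    pvSC vals = (pvPairs vals).foldl (fun d q => d.modify q.1 [] (· ++ [q.2])) PySem.Dict.empty := by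
  unfold pvSC pvPairs
  rw [List.foldl_flatMap]
  apply PySem.List.foldl_congr_mem
  intro acc p _
  rw [List.foldl_map]

lemma pvFilter_pvPairs_aux (s : String) :
    ∀ (L : List (Int × List String)),
    (L.flatMap (fun p => (PySem.Set.ofList p.2).map (fun st => (st, p.1)))).filter (fun q => q.1 == s)
      = (L.filter (fun p => decide (s ∈ p.2))).map (fun p => (s, p.1)) := by
  intro L
  induction L with
  | nil => simp
  | cons p L ih =>
    simp only [List.flatMap_cons, List.filter_append, ih, List.filter_cons]
    rw [List.filter_map]
    have : ((fun q : String × Int => q.1 == s) ∘ (fun st => (st, p.1))) = (fun st => st == s) := rfl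
    rw [this, pvFilter_beq_nodup s _ (PySem.Set.nodup_ofList p.2)]
    by_cases hm : s ∈ p.2
    · simp [hm, PySem.Set.mem_ofList]
    · simp [hm, PySem.Set.mem_ofList]

lemma pvFilter_pvPairs (vals : List (List String)) (s : String) :
    (pvPairs vals).filter (fun q => q.1 == s)
      = ((PySem.List.enumerate vals 0).filter (fun p => decide (s ∈ p.2))).map (fun p => (s, p.1)) :=
  pvFilter_pvPairs_aux s (PySem.List.enumerate vals 0)

lemma pvGetD_pvSC (vals : List (List String)) (s : String) :
    (pvSC vals).getD s [] = pvG vals s := by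
  rw [pvSC_eq_flat, PySem.Dict.getD_foldl_modify_append, pvFilter_pvPairs]
  simp [pvG, List.map_map]

lemma pvNodup_keys_pvSC (vals : List (List String)) : (pvSC vals).keys.Nodup := by
  rw [pvSC_eq_flat]
  exact PySem.Dict.nodup_keys_foldl_modify_key (κ := String) (ν := List Int)
    (pvPairs vals) (fun q => q.1) [] (fun _ q v => v ++ [q.2]) PySem.Dict.empty
    PySem.Dict.nodup_keys_empty

lemma pvKeys_pvSC (vals : List (List String)) :
    (pvSC vals).keys = PySem.Set.ofList ((pvPairs vals).map (fun q => q.1)) := by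
  rw [pvSC_eq_flat]
  rw [PySem.Dict.keys_foldl_modify_key (κ := String) (ν := List Int)
    (pvPairs vals) (fun q => q.1) [] (fun _ q v => v ++ [q.2]) PySem.Dict.empty]
  simp [PySem.Set.update_nil_left]

lemma pvMem_pvG (vals : List (List String)) (s : String) (i : Int) :
    i ∈ pvG vals s ↔ ∃ (k : Nat) (h : k < vals.length), i = (k : Int) ∧ s ∈ vals[k] := by
  simp only [pvG, List.mem_map, List.mem_filter, PySem.List.mem_enumerate_iff]
  constructor
  · rintro ⟨p, ⟨⟨k, hk, rfl⟩, hs⟩, rfl⟩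
    exact ⟨k, hk, by simpa using hs⟩
  · rintro ⟨k, hk, rfl, hs⟩
    exact ⟨((k : Int), vals[k]), ⟨⟨k, hk, by simp⟩, by simpa using hs⟩, rfl⟩

lemma pvMem_keys_pvSC {vals : List (List String)} {s : String} {x : Int}
    (hx : x ∈ pvG vals s) : s ∈ (pvSC vals).keys := by
  rw [pvKeys_pvSC, PySem.Set.mem_ofList]
  rw [pvMem_pvG] at hx
  obtain ⟨k, hk, rfl, hs⟩ := hx
  refine List.mem_map.2 ⟨(s, (k : Int)), ?_, rfl⟩
  refine List.mem_flatMap.2 ⟨((k : Int), vals[k]), ?_, ?_⟩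
  · exact (PySem.List.mem_enumerate_iff _ _ _).2 ⟨k, hk, by simp⟩
  · exact List.mem_map.2 ⟨s, (PySem.Set.mem_ofList _ _).2 hs, rfl⟩

lemma pvPairwise_pvG (vals : List (List String)) (s : String) :
    (pvG vals s).Pairwise (· < ·) := by
  unfold pvG
  rw [List.pairwise_map]
  exact (PySem.List.pairwise_lt_enumerate vals 0).filter _

lemma pvMemFoldlStep {α β : Type} [BEq β] [LawfulBEq β] (F : α → PySem.Set β → PySem.Set β)
    (Q : α → β → Prop) (h : ∀ x s y, y ∈ F x s ↔ y ∈ s ∨ Q x y) :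
    ∀ (l : List α) (s0 : PySem.Set β) (y : β),
      y ∈ l.foldl (fun s x => F x s) s0 ↔ y ∈ s0 ∨ ∃ x ∈ l, Q x y := by
  intro l
  induction l with
  | nil => simp
  | cons x xs ih =>
    intro s0 y
    rw [List.foldl_cons, ih, h]
    simp only [List.mem_cons]
    constructor
    · rintro ((hy | hq) | ⟨z, hz, hq⟩)
      · exact Or.inl hy
      · exact Or.inr ⟨x, Or.inl rfl, hq⟩
      · exact Or.inr ⟨z, Or.inr hz, hq⟩
    · rintro (hy | ⟨z, (rfl | hz), hq⟩)
      · exact Or.inl (Or.inl hy)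
      · exact Or.inl (Or.inr hq)
      · exact Or.inr ⟨z, hz, hq⟩

-- On a strictly increasing list, the index-pair loop reaches exactly the value pairs x < y.
lemma pvStrictPairs (l : List Int) (hs : l.Pairwise (· < ·)) (x y : Int) :
    (∃ a ∈ PySem.List.pyRange 0 (l.length : Int) 1, ∃ b ∈ PySem.List.pyRange (a + 1) (l.length : Int) 1,
        (x, y) = (PySem.List.pyGetD l a 0, PySem.List.pyGetD l b 0))
    ↔ x ∈ l ∧ y ∈ l ∧ x < y := by
  rw [List.pairwise_iff_getElem] at hs
  constructor
  · rintro ⟨a, ha, b, hb, he⟩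
    rw [PySem.List.mem_pyRange_one] at ha hb
    obtain ⟨ha0, haL⟩ := ha
    obtain ⟨hab, hbL⟩ := hb
    have hb0 : 0 ≤ b := by omega
    rw [PySem.List.pyGetD_eq_getElem l 0 ha0 haL, PySem.List.pyGetD_eq_getElem l 0 hb0 hbL] at he
    have haN : a.toNat < l.length := by omega
    have hbN : b.toNat < l.length := by omega
    have hlt : a.toNat < b.toNat := by omega
    refine ⟨?_, ?_, ?_⟩
    · rw [Prod.mk.injEq] at he; rw [he.1]; exact l.getElem_mem haN
    · rw [Prod.mk.injEq] at he; rw [he.2]; exact l.getElem_mem hbN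
    · rw [Prod.mk.injEq] at he; rw [he.1, he.2]; exact hs a.toNat b.toNat haN hbN hlt
  · rintro ⟨hx, hy, hxy⟩
    obtain ⟨a, haN, rfl⟩ := List.mem_iff_getElem.1 hx
    obtain ⟨b, hbN, rfl⟩ := List.mem_iff_getElem.1 hy
    have hab : a < b := by
      rcases Nat.lt_trichotomy a b with h | h | h
      · exact h
      · subst h; exact absurd hxy (lt_irrefl _)
      · exact absurd hxy (by exact absurd (hs b a hbN haN h) (by omega))
    refine ⟨(a : Int), ?_, (b : Int), ?_, ?_⟩
    · rw [PySem.List.mem_pyRange_one]; omega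
    · rw [PySem.List.mem_pyRange_one]; omega
    · rw [PySem.List.pyGetD_natCast, PySem.List.pyGetD_natCast]
      simp [List.getD_eq_getElem?_getD, haN, hbN]

-- (x, y) got marked iff some student's index list contains both x and y with x < y.
lemma pvMem_pvConf (vals : List (List String)) (x y : Int) :
    (x, y) ∈ pvConf vals ↔ ∃ s, x ∈ pvG vals s ∧ y ∈ pvG vals s ∧ x < y := by
  unfold pvConf
  rw [pvMemFoldlStep
      (F := fun idxs conf =>
        (PySem.List.pyRange 0 (idxs.length : Int) 1).foldl (fun conf a =>
          (PySem.List.pyRange (a + 1) (idxs.length : Int) 1).foldl (fun conf b =>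
            PySem.Set.add conf (PySem.List.pyGetD idxs a 0, PySem.List.pyGetD idxs b 0)) conf) conf)
      (Q := fun idxs z =>
        ∃ a ∈ PySem.List.pyRange 0 (idxs.length : Int) 1,
          ∃ b ∈ PySem.List.pyRange (a + 1) (idxs.length : Int) 1,
            z = (PySem.List.pyGetD idxs a 0, PySem.List.pyGetD idxs b 0))
      (fun idxs s z => by
        exact pvMemFoldlStep
          (F := fun a conf =>
            (PySem.List.pyRange (a + 1) (idxs.length : Int) 1).foldl (fun conf b =>
              PySem.Set.add conf (PySem.List.pyGetD idxs a 0, PySem.List.pyGetD idxs b 0)) conf)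
          (Q := fun a z => ∃ b ∈ PySem.List.pyRange (a + 1) (idxs.length : Int) 1,
              z = (PySem.List.pyGetD idxs a 0, PySem.List.pyGetD idxs b 0))
          (fun a s z => PySem.Set.mem_foldl_add _ _ s z)
          _ s z)]
  rw [PySem.Dict.values_eq_map_keys (pvSC vals) (pvNodup_keys_pvSC vals) []]
  constructor
  · rintro (h | ⟨idxs, hidxs, hq⟩)
    · simp [PySem.Set.empty] at h
    · obtain ⟨s, _, rfl⟩ := List.mem_map.1 hidxs
      rw [pvGetD_pvSC] at hq
      exact ⟨s, (pvStrictPairs _ (pvPairwise_pvG vals s) x y).1 hq⟩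
  · rintro ⟨s, hx, hy, hxy⟩
    refine Or.inr ⟨pvG vals s, ?_, (pvStrictPairs _ (pvPairwise_pvG vals s) x y).2 ⟨hx, hy, hxy⟩⟩
    exact List.mem_map.2 ⟨s, pvMem_keys_pvSC hx, pvGetD_pvSC vals s⟩

lemma pvGetD_keys (d : PySem.Dict String (List String)) (hnd : d.keys.Nodup)
    (k : Nat) (hk : k < d.keys.length) :
    PySem.Dict.getD d d.keys[k] [] = d.values[k]'(by simpa [PySem.Dict.keys, PySem.Dict.values] using hk) := by
  have hk' : k < d.items.length := by simpa [PySem.Dict.keys] using hk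
  have hmem : (d.keys[k], d.values[k]'(by simpa [PySem.Dict.keys, PySem.Dict.values] using hk)) ∈ d.items := by
    simp only [PySem.Dict.keys, PySem.Dict.values, List.getElem_map]
    exact Prod.mk.eta ▸ List.getElem_mem hk'
  exact PySem.Dict.getD_of_mem_items d hmem hnd []

-- A's per-pair test agrees with B's marked-pair lookup on every index pair i < j.
lemma pvCond_iff (cs : List (String × List String)) (i j : Int)
    (hi : 0 ≤ i) (hij : i < j) (hj : j < ((PySem.Dict.ofList cs).keys.length : Int)) :
    (PySem.Set.inter
        (PySem.Set.ofList (PySem.Dict.getD (PySem.Dict.ofList cs) (PySem.List.pyGetD (PySem.Dict.ofList cs).keys i "") []))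
        (PySem.Set.ofList (PySem.Dict.getD (PySem.Dict.ofList cs) (PySem.List.pyGetD (PySem.Dict.ofList cs).keys j "") [])) ≠ [])
    ↔ (i, j) ∈ pvConf (PySem.Dict.values (PySem.Dict.ofList cs)) := by
  set d := PySem.Dict.ofList cs with hd
  have hnd : d.keys.Nodup := PySem.Dict.nodup_keys_ofList cs
  have hlen : d.values.length = d.keys.length := by simp [PySem.Dict.keys, PySem.Dict.values]
  have hiN : i.toNat < d.keys.length := by omega
  have hjN : j.toNat < d.keys.length := by omega
  have hgi : PySem.List.pyGetD d.keys i "" = d.keys[i.toNat] :=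
    PySem.List.pyGetD_eq_getElem d.keys "" hi (by exact_mod_cast hj.trans_le' hij.le)
  have hgj : PySem.List.pyGetD d.keys j "" = d.keys[j.toNat] :=
    PySem.List.pyGetD_eq_getElem d.keys "" (by omega) (by exact_mod_cast hj)
  rw [hgi, hgj, pvGetD_keys d hnd i.toNat hiN, pvGetD_keys d hnd j.toNat hjN]
  rw [pvMem_pvConf]
  rw [Ne, List.eq_nil_iff_forall_not_mem]
  push Not
  constructor
  · rintro ⟨st, hst⟩
    rw [PySem.Set.mem_inter, PySem.Set.mem_ofList, PySem.Set.mem_ofList] at hst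
    refine ⟨st, ?_, ?_, hij⟩
    · exact (pvMem_pvG _ st i).2 ⟨i.toNat, by omega, by omega, hst.1⟩
    · exact (pvMem_pvG _ st j).2 ⟨j.toNat, by omega, by omega, hst.2⟩
  · rintro ⟨s, hx, hy, -⟩
    rw [pvMem_pvG] at hx hy
    obtain ⟨k1, hk1, hik, hs1⟩ := hx
    obtain ⟨k2, hk2, hjk, hs2⟩ := hy
    have e1 : k1 = i.toNat := by omega
    have e2 : k2 = j.toNat := by omega
    subst e1; subst e2
    exact ⟨s, (PySem.Set.mem_inter _ _ s).2 ⟨(PySem.Set.mem_ofList _ s).2 hs1, (PySem.Set.mem_ofList _ s).2 hs2⟩⟩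

-- ===== VERDICT (by name: the statement is the Claim_ definition above) =====
theorem find_course_conflicts_spec : Claim_equal_find_course_conflicts := by
  intro cs cts _
  unfold Spec_find_course_conflicts
  have halt : find_course_conflicts_alt cs cts =
      (PySem.List.pyRange 0 (((PySem.Dict.ofList cs).keys.length : Nat) : Int) 1).foldl (fun out i =>
        (PySem.List.pyRange (i + 1) (((PySem.Dict.ofList cs).keys.length : Nat) : Int) 1).foldl (fun out j =>
          if PySem.Set.contains (pvConf (PySem.Dict.values (PySem.Dict.ofList cs))) (i, j) then
            out ++ [(PySem.List.pyGetD (PySem.Dict.ofList cs).keys i "", PySem.List.pyGetD (PySem.Dict.ofList cs).keys j "")]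
          else out) out) [] := rfl
  rw [halt]
  show (PySem.List.pyRange 0 _ 1).foldl _ [] = _
  apply PySem.List.foldl_congr_mem
  intro acc i hi
  apply PySem.List.foldl_congr_mem
  intro acc2 j hj
  rw [PySem.List.mem_pyRange_one] at hi hj
  have hcond := pvCond_iff cs i j hi.1 (by omega) (by omega)
  rw [if_congr (hcond.trans (PySem.Set.contains_iff _ _).symm) rfl rfl]
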